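-- pv_equiv track=rewrite | github.com/danieljhkim/DataStructures-Algorithms | python/leetcode/practice/practice5.py | canChange
-- ===== SOURCE A (Python) =====
-- def canChange(start: str, target: str) -> bool:
--     if start.replace("_", "") != target.replace("_", ""):
--         return False
--     j = 0
--     for i in range(len(start)):
--         if start[i] == "_":
--             continue
--         while target[j] == "_":
--             j += 1
--         if start[i] != target[j]:
--             return False
--         if start[i] == "L" and i < j:
--             return False
--         if start[i] == "R" and i > j:
--             return False
--         j += 1
--
--     return True
-- ===== SOURCE B (Python) =====
-- def canChange(start: str, target: str) -> bool:
--     if [c for c in start if c != "_"] != [c for c in target if c != "_"]: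
--         return False
--     ls = lt = rs = rt = 0
--     for k in range(max(len(start), len(target))):
--         if k < len(start):
--             if start[k] == "L":
--                 ls += 1
--             elif start[k] == "R":
--                 rs += 1
--         if k < len(target):
--             if target[k] == "L":
--                 lt += 1
--             elif target[k] == "R":
--                 rt += 1
--         if ls > lt or rt > rs:
--             return False
--     return True
-- ===== Notes on version B (the rewrite author's own statement) =====
-- stated objective: alternative
-- what changed: A pairs up the non-underscore pieces with an interleaved two-pointer scan (a running pointer j over target advanced by an inner while) and checks each pair's character and direction; B instead checks the piece sequences are equal and then verifies the prefix-count invariant in one counting pass over the indices: at every prefix, target must have at least as many 'L's and at most as many 'R's as start.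
import Mathlib
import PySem

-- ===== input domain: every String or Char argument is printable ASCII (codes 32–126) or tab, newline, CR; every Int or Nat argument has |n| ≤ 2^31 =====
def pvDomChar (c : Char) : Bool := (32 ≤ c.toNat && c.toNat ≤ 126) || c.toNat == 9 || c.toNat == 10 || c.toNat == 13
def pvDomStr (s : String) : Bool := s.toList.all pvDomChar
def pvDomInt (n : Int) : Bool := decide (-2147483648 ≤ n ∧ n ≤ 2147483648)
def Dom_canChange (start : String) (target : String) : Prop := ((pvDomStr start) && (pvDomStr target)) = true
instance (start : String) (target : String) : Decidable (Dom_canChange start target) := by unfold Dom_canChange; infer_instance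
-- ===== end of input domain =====

-- B replaces A's two-pointer piece-pairing scan by the prefix-count invariant: after the
-- piece-sequence guard, start can reach target iff at every prefix target has at least as
-- many 'L's and at most as many 'R's as start (objective: alternative algorithm).

-- ===== PORT A =====
-- the inner `while target[j] == "_": j += 1`; if j runs past the end it stops (Python would
-- raise there, but after A's replace-equality guard that point is unreachable)
def canChangeSkip (ts : List Char) (j : Nat) : Nat :=
  if h : j < ts.length then (if ts[j] = '_' then canChangeSkip ts (j + 1) else j) else j
  termination_by ts.length - j

-- the `for i in range(len(start))` loop of A, with its running state (i, j)
def canChangeLoop (ts : List Char) : List Char → Nat → Nat → Bool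
  | [], _, _ => true
  | c :: rest, i, j =>
    if c = '_' then canChangeLoop ts rest (i + 1) j
    else
      let j' := canChangeSkip ts j
      match ts[j']? with
      | none => false   -- unreachable after the replace guard (Python would raise IndexError)
      | some d =>
        if c ≠ d then false
        else if c = 'L' ∧ i < j' then false
        else if c = 'R' ∧ i > j' then false
        else canChangeLoop ts rest (i + 1) (j' + 1)

def canChange (start : String) (target : String) : Bool :=
  if PySem.Str.replace start "_" "" ≠ PySem.Str.replace target "_" "" then false
  else canChangeLoop target.toList start.toList 0 0

-- ===== PORT B =====
-- the `for k in range(max(len(start), len(target)))` loop of B with its four counters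
def canChangeAltLoop (s t : List Char) : List Nat → Nat → Nat → Nat → Nat → Bool
  | [], _, _, _, _ => true
  | k :: ks, ls, lt, rs, rt =>
    let p :=
      match s[k]? with
      | some a => if a = 'L' then (ls + 1, rs) else if a = 'R' then (ls, rs + 1) else (ls, rs)
      | none => (ls, rs)
    let q :=
      match t[k]? with
      | some a => if a = 'L' then (lt + 1, rt) else if a = 'R' then (lt, rt + 1) else (lt, rt)
      | none => (lt, rt)
    if p.1 > q.1 ∨ q.2 > p.2 then false
    else canChangeAltLoop s t ks p.1 q.1 p.2 q.2

def canChange_alt (start : String) (target : String) : Bool :=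
  if start.toList.filter (· ≠ '_') ≠ target.toList.filter (· ≠ '_') then false
  else canChangeAltLoop start.toList target.toList
    (List.range (max start.toList.length target.toList.length)) 0 0 0 0

-- ===== PRECONDITION & SPEC =====
def Spec_canChange (start : String) (target : String) (out : Bool) : Prop := out = canChange_alt start target
instance (start : String) (target : String) (out : Bool) : Decidable (Spec_canChange start target out) := by unfold Spec_canChange; infer_instance

-- ===== CLAIM (what is proved, stated in full; the proofs are below) =====
def Claim_equal_canChange : Prop := ∀ (start : String) (target : String), Dom_canChange start target → Spec_canChange start target (canChange start target)

-- ===== LEMMAS AND PROOFS =====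

-- filtered (char, index) pairs of a char list, indices starting at `off`
def fpairs : List Char → Nat → List (Char × Nat)
  | [], _ => []
  | c :: r, off => if c = '_' then fpairs r (off + 1) else (c, off) :: fpairs r (off + 1)

-- the pairwise form of A's loop over the aligned piece lists
def zipOk (xs ys : List (Char × Nat)) : Bool :=
  (xs.zip ys).all (fun q =>
    (q.1.1 == q.2.1) && !(q.1.1 == 'L' && decide (q.1.2 < q.2.2))
      && !(q.1.1 == 'R' && decide (q.1.2 > q.2.2)))

-- positions (0-based, offset `off`) of character c in a char list
def occg (c : Char) : List Char → Nat → List Nat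
  | [], _ => []
  | a :: r, off => if a = c then off :: occg c r (off + 1) else occg c r (off + 1)

-- the prefix condition B's counters check after processing index k
abbrev pcond (s t : List Char) (k : Nat) : Prop :=
  (s.take (k+1)).count 'L' ≤ (t.take (k+1)).count 'L' ∧
  (t.take (k+1)).count 'R' ≤ (s.take (k+1)).count 'R'

lemma map_fst_fpairs (l : List Char) : ∀ off, (fpairs l off).map Prod.fst = l.filter (· ≠ '_') := by
  induction l with
  | nil => intro off; simp [fpairs]
  | cons c r ih =>
    intro off
    by_cases hc : c = '_' <;> simp [fpairs, hc, ih]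

lemma replace_go_underscore : ∀ (fuel : Nat) (l acc : List Char), l.length ≤ fuel →
    PySem.Chars.replace.go ['_'] [] fuel l acc = acc.reverse ++ l.filter (· ≠ '_') := by
  intro fuel
  induction fuel with
  | zero =>
    intro l acc h
    have : l = [] := List.length_eq_zero_iff.mp (Nat.le_zero.mp h)
    subst this; simp [PySem.Chars.replace.go]
  | succ n ih =>
    intro l acc h
    cases l with
    | nil => simp [PySem.Chars.replace.go]
    | cons c t =>
      rw [PySem.Chars.replace.go]
      by_cases hc : c = '_'
      · subst hc
        simp only [List.isPrefixOf, List.filter_cons]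
        simp [ih t acc (by simpa using Nat.lt_succ_iff.mp (by simpa using h))]
      · have hpre : List.isPrefixOf ['_'] (c :: t) = false := by
          simp [List.isPrefixOf]; exact fun h' => hc h'.symm
        rw [hpre]
        simp only [Bool.false_eq_true, if_false]
        rw [ih t (c :: acc) (by simpa using Nat.lt_succ_iff.mp (by simpa using h))]
        simp [hc]

lemma replace_underscore (s : String) :
    (PySem.Str.replace s "_" "").toList = s.toList.filter (· ≠ '_') := by
  have h : PySem.Str.replace s "_" "" =
      String.ofList (PySem.Chars.replace s.toList ['_'] []) := rfl
  rw [h]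
  rw [show PySem.Chars.replace s.toList ['_'] [] =
      PySem.Chars.replace.go ['_'] [] s.toList.length s.toList [] by
    rw [PySem.Chars.replace]; rfl]
  rw [replace_go_underscore s.toList.length s.toList [] (le_refl _)]
  simp

-- the inner while loop, read off `fpairs` of the remaining suffix of target
lemma skip_cons (ts : List Char) : ∀ (j : Nat) (c : Char) (p : Nat) (rest : List (Char × Nat)),
    fpairs (ts.drop j) j = (c, p) :: rest →
    canChangeSkip ts j = p ∧ ts[p]? = some c ∧ j ≤ p ∧ fpairs (ts.drop (p + 1)) (p + 1) = rest := by
  intro j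
  induction hn : ts.length - j using Nat.strong_induction_on generalizing j with
  | _ n ihn =>
    intro c p rest hfp
    by_cases hj : j < ts.length
    · have hdrop : ts.drop j = ts[j] :: ts.drop (j + 1) := List.drop_eq_getElem_cons hj
      rw [hdrop] at hfp
      by_cases hc : ts[j] = '_'
      · rw [fpairs, if_pos hc] at hfp
        have hlt : ts.length - (j + 1) < n := by omega
        obtain ⟨h1, h2, h3, h4⟩ := ihn _ hlt (j + 1) rfl c p rest hfp
        refine ⟨?_, h2, by omega, h4⟩
        rw [canChangeSkip, dif_pos hj, if_pos hc]; exact h1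
      · rw [fpairs, if_neg hc] at hfp
        obtain ⟨hc1, hp1⟩ := Prod.mk.injEq _ _ _ _ ▸ (List.cons.injEq _ _ _ _ ▸ hfp).1
        have hrest := (List.cons.injEq _ _ _ _ ▸ hfp).2
        subst hp1
        refine ⟨?_, ?_, le_refl _, hrest⟩
        · rw [canChangeSkip, dif_pos hj, if_neg hc]
        · rw [List.getElem?_eq_getElem hj, hc1]
    · exfalso
      rw [List.drop_of_length_le (by omega)] at hfp
      simp [fpairs] at hfp

-- A's loop equals the pairwise check, given the aligned filtered chars
lemma loop_eq_zipOk (ts : List Char) : ∀ (ss : List Char) (i j : Nat) (rest : List (Char × Nat)),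
    fpairs (ts.drop j) j = rest →
    (fpairs ss i).map Prod.fst = rest.map Prod.fst →
    canChangeLoop ts ss i j = zipOk (fpairs ss i) rest := by
  intro ss
  induction ss with
  | nil => intro i j rest _ _; simp [canChangeLoop, fpairs, zipOk]
  | cons c r ih =>
    intro i j rest hrest hmap
    by_cases hc : c = '_'
    · rw [canChangeLoop, if_pos hc]
      rw [fpairs, if_pos hc] at hmap ⊢
      exact ih (i + 1) j rest hrest hmap
    · rw [fpairs, if_neg hc] at hmap ⊢
      cases rest with
      | nil => simp at hmap
      | cons q rest' =>
        obtain ⟨d, p⟩ := q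
        simp only [List.map_cons, List.cons.injEq] at hmap
        obtain ⟨hcd, hmap'⟩ := hmap
        obtain ⟨h1, h2, h3, h4⟩ := skip_cons ts j c p rest' (hcd ▸ hrest)
        rw [canChangeLoop, if_neg hc]
        simp only [h1, h2]
        subst hcd
        rw [zipOk]
        simp only [List.zip_cons_cons, List.all_cons, beq_self_eq_true, Bool.true_and]
        by_cases hL : c = 'L' ∧ i < p
        · rw [if_neg (by simp), if_pos hL]
          simp [hL.1, hL.2]
        · by_cases hR : c = 'R' ∧ i > p
          · rw [if_neg (by simp), if_neg hL, if_pos hR]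
            simp [hR.1, hR.2]
          · rw [if_neg (by simp), if_neg hL, if_neg hR]
            have hLb : (c == 'L' && decide (i < p)) = false := by
              by_cases h : c = 'L' <;> simp [h] at hL ⊢ <;> omega
            have hRb : (c == 'R' && decide (p < i)) = false := by
              by_cases h : c = 'R' <;> simp [h] at hR ⊢ <;> omega
            rw [hLb, hRb]
            simp only [Bool.not_false, Bool.true_and, Bool.and_true]
            exact ih (i + 1) (p + 1) rest' h4 hmap'

-- ===== occurrence-position lemmas =====
lemma occg_ge (c : Char) : ∀ (l : List Char) (off x : Nat), x ∈ occg c l off → off ≤ x := by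
  intro l
  induction l with
  | nil => intro off x h; simp [occg] at h
  | cons a r ih =>
    intro off x h
    by_cases ha : a = c
    · rw [occg, if_pos ha] at h
      rcases List.mem_cons.mp h with h | h
      · omega
      · have := ih (off + 1) x h; omega
    · rw [occg, if_neg ha] at h
      have := ih (off + 1) x h; omega

lemma occg_sorted (c : Char) : ∀ (l : List Char) (off : Nat), (occg c l off).Pairwise (· < ·) := by
  intro l
  induction l with
  | nil => intro off; simp [occg]
  | cons a r ih =>
    intro off
    by_cases ha : a = c
    · rw [occg, if_pos ha]
      refine List.pairwise_cons.mpr ⟨?_, ih (off + 1)⟩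
      intro x hx
      have := occg_ge c r (off + 1) x hx; omega
    · rw [occg, if_neg ha]; exact ih (off + 1)

lemma occg_length (c : Char) (hc : c ≠ '_') : ∀ (l : List Char) (off : Nat),
    (occg c l off).length = (l.filter (· ≠ '_')).count c := by
  intro l
  induction l with
  | nil => intro off; simp [occg]
  | cons a r ih =>
    intro off
    by_cases ha : a = c
    · subst ha
      rw [occg, if_pos rfl]
      simp [List.filter_cons, hc, List.count_cons, ih (off + 1)]
    · rw [occg, if_neg ha]
      by_cases hu : a = '_'
      · simp [List.filter_cons, hu, ih (off + 1)]
      · simp [List.filter_cons, hu, List.count_cons, ha, ih (off + 1)]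

lemma occg_countP_zero (c : Char) (l : List Char) (off : Nat) :
    (occg c l off).countP (fun x => decide (x < off)) = 0 := by
  rw [List.countP_eq_zero]
  intro x hx
  have := occg_ge c l off x hx
  simp; omega

lemma occg_countP (c : Char) : ∀ (l : List Char) (off n : Nat),
    (occg c l off).countP (fun x => decide (x < off + n)) = (l.take n).count c := by
  intro l
  induction l with
  | nil => intro off n; simp [occg]
  | cons a r ih =>
    intro off n
    cases n with
    | zero => simpa using occg_countP_zero c (a :: r) off
    | succ n =>
      have hshift : ∀ (ll : List Nat), ll.countP (fun x => decide (x < off + (n + 1)))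
          = ll.countP (fun x => decide (x < (off + 1) + n)) := by
        intro ll
        apply List.countP_congr
        intro x _
        constructor <;> intro h <;> simp at h ⊢ <;> omega
      by_cases ha : a = c
      · subst ha
        rw [occg, if_pos rfl, List.take_succ_cons, List.count_cons_self,
          List.countP_cons, hshift, ih (off + 1) n]
        simp
      · rw [occg, if_neg ha, List.take_succ_cons, hshift, ih (off + 1) n,
          List.count_cons]
        simp only [beq_iff_eq]
        simp [ha]

lemma fpairs_filterMap_occ (c : Char) (hc : c ≠ '_') : ∀ (l : List Char) (off : Nat),
    (fpairs l off).filterMap (fun q => if q.1 = c then some q.2 else none) = occg c l off := by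
  intro l
  induction l with
  | nil => intro off; simp [fpairs, occg]
  | cons a r ih =>
    intro off
    by_cases hu : a = '_'
    · subst hu
      rw [fpairs, if_pos rfl, occg, if_neg (by exact fun h => hc h.symm)]
      exact ih (off + 1)
    · rw [fpairs, if_neg hu]
      by_cases ha : a = c
      · subst ha
        rw [occg, if_pos rfl]
        simp [List.filterMap_cons, ih (off + 1)]
      · rw [occg, if_neg ha]
        simp [List.filterMap_cons, ha, ih (off + 1)]

-- filtering an aligned zip = zip of the filtered lists
lemma zip_filterMap_aligned (c : Char) : ∀ (X Y : List (Char × Nat)),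
    X.map Prod.fst = Y.map Prod.fst →
    (X.zip Y).filterMap (fun q => if q.1.1 = c then some (q.1.2, q.2.2) else none)
      = (X.filterMap (fun q => if q.1 = c then some q.2 else none)).zip
        (Y.filterMap (fun q => if q.1 = c then some q.2 else none)) := by
  intro X
  induction X with
  | nil => intro Y h; simp
  | cons x X' ih =>
    intro Y h
    cases Y with
    | nil => simp at h
    | cons y Y' =>
      simp only [List.map_cons, List.cons.injEq] at h
      obtain ⟨hxy, h'⟩ := h
      by_cases hx : x.1 = c
      · have hy : y.1 = c := hxy ▸ hx
        simp [List.zip_cons_cons, List.filterMap_cons, hx, hy, ih Y' h']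
      · have hy : ¬ y.1 = c := by rw [← hxy]; exact hx
        simp [List.zip_cons_cons, List.filterMap_cons, hx, hy, ih Y' h']

-- ===== the core combinatorial lemma: pointwise domination ↔ prefix counts =====
lemma count_dom_of_point : ∀ (P Q : List Nat), P.length = Q.length →
    (∀ q ∈ P.zip Q, q.2 ≤ q.1) → ∀ m : Nat,
    P.countP (fun x => decide (x < m)) ≤ Q.countP (fun x => decide (x < m)) := by
  intro P
  induction P with
  | nil => intro Q _ _ m; simp
  | cons p P' ih =>
    intro Q hlen h m
    cases Q with
    | nil => simp at hlen
    | cons q Q' =>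
      have hpq : q ≤ p := h (p, q) (by simp [List.zip_cons_cons])
      have htail : ∀ r ∈ P'.zip Q', r.2 ≤ r.1 := by
        intro r hr; exact h r (by simp [List.zip_cons_cons, hr])
      have hih := ih Q' (by simpa using hlen) htail m
      rw [List.countP_cons, List.countP_cons]
      by_cases hp : p < m <;> by_cases hq : q < m <;> simp [hp, hq] <;> omega

lemma point_iff_count (P Q : List Nat) (hP : P.Pairwise (· < ·)) (hQ : Q.Pairwise (· < ·))
    (hlen : P.length = Q.length) :
    (∀ q ∈ P.zip Q, q.2 ≤ q.1) ↔
      ∀ m : Nat, P.countP (fun x => decide (x < m)) ≤ Q.countP (fun x => decide (x < m)) := by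
  constructor
  · exact count_dom_of_point P Q hlen
  · intro hcnt r hr
    rw [List.mem_iff_getElem] at hr
    obtain ⟨i, hi, hri⟩ := hr
    rw [List.getElem_zip] at hri
    have hiP : i < P.length := lt_of_lt_of_le hi (by simp [List.length_zip])
    have hiQ : i < Q.length := lt_of_lt_of_le hi (by simp [List.length_zip])
    subst hri
    simp only
    by_contra hgt
    push_neg at hgt
    have hmono_P := List.pairwise_iff_getElem.mp hP
    have hmono_Q := List.pairwise_iff_getElem.mp hQ
    -- countP P (· ≤ P[i]) ≥ i + 1
    have h1 : i + 1 ≤ P.countP (fun x => decide (x < P[i] + 1)) := by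
      have hfull : (P.take (i + 1)).countP (fun x => decide (x < P[i] + 1))
          = (P.take (i + 1)).length := by
        rw [List.countP_eq_length]
        intro a ha
        rw [List.mem_iff_getElem] at ha
        obtain ⟨j, hj, haj⟩ := ha
        have hjlen : j < (P.take (i + 1)).length := hj
        have hji : j ≤ i := by simp [List.length_take] at hjlen; omega
        have hj' : j < P.length := by omega
        rw [List.getElem_take] at haj
        subst haj
        rcases Nat.lt_or_ge j i with hlt | hge
        · have := hmono_P j i hj' hiP hlt; simp; omega
        · have hji' : j = i := by omega
          subst hji'; simp
      have hlen' : (P.take (i + 1)).length = i + 1 := by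
        simp [List.length_take]; omega
      have hsub := (List.take_sublist (i + 1) P).countP_le
        (p := fun x => decide (x < P[i] + 1))
      omega
    -- countP Q (· ≤ P[i]) ≤ i
    have h2 : Q.countP (fun x => decide (x < P[i] + 1)) ≤ i := by
      conv_lhs => rw [← List.take_append_drop i Q]
      rw [List.countP_append]
      have ha : (Q.take i).countP (fun x => decide (x < P[i] + 1)) ≤ i := by
        have := List.countP_le_length (l := Q.take i) (p := fun x => decide (x < P[i] + 1))
        simp [List.length_take] at this ⊢
        omega
      have hb : (Q.drop i).countP (fun x => decide (x < P[i] + 1)) = 0 := by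
        rw [List.countP_eq_zero]
        intro a ha'
        rw [List.mem_iff_getElem] at ha'
        obtain ⟨j, hj, haj⟩ := ha'
        have hij : i + j < Q.length := by simp [List.length_drop] at hj; omega
        rw [List.getElem_drop] at haj
        subst haj
        have hge : Q[i] ≤ Q[i + j]'hij := by
          rcases Nat.eq_zero_or_pos j with h0 | h0
          · subst h0; simp
          · exact le_of_lt (hmono_Q i (i + j) hiQ hij (by omega))
        simp; omega
      omega
    have := hcnt (P[i] + 1)
    omega

-- ===== zipOk ↔ the two pointwise conditions =====
lemma zip_fst_eq : ∀ (X Y : List (Char × Nat)), X.map Prod.fst = Y.map Prod.fst →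
    ∀ q ∈ X.zip Y, q.1.1 = q.2.1 := by
  intro X
  induction X with
  | nil => intro Y _ q hq; simp at hq
  | cons x X' ih =>
    intro Y h q hq
    cases Y with
    | nil => simp at hq
    | cons y Y' =>
      simp only [List.map_cons, List.cons.injEq] at h
      rw [List.zip_cons_cons, List.mem_cons] at hq
      rcases hq with hq | hq
      · subst hq; exact h.1
      · exact ih Y' h.2 q hq

lemma zipOk_iff (X Y : List (Char × Nat)) (hfst : X.map Prod.fst = Y.map Prod.fst) :
    zipOk X Y = true ↔
      ((∀ q ∈ X.zip Y, q.1.1 = 'L' → q.2.2 ≤ q.1.2) ∧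
       (∀ q ∈ X.zip Y, q.1.1 = 'R' → q.1.2 ≤ q.2.2)) := by
  have hfq := zip_fst_eq X Y hfst
  rw [zipOk, List.all_eq_true]
  constructor
  · intro h
    constructor
    · intro q hq hc
      have hb := h q hq
      simp [hc] at hb
      omega
    · intro q hq hc
      have hb := h q hq
      simp [hc] at hb
      omega
  · rintro ⟨hL, hR⟩ q hq
    have hf := hfq q hq
    by_cases hcL : q.1.1 = 'L'
    · have hf' : q.2.1 = 'L' := by rw [← hf]; exact hcL
      have := hL q hq hcL
      simp [hcL, hf']
      omega
    · by_cases hcR : q.1.1 = 'R'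
      · have hf' : q.2.1 = 'R' := by rw [← hf]; exact hcR
        have := hR q hq hcR
        simp [hcR, hf']
        omega
      · simp [hcL, hcR, ← hf]

-- ===== B's loop invariant =====
lemma altStep_pair (l : List Char) (a : Nat) (x y : Nat)
    (hx : x = (l.take a).count 'L') (hy : y = (l.take a).count 'R') :
    (match l[a]? with
     | some d => if d = 'L' then (x + 1, y) else if d = 'R' then (x, y + 1) else (x, y)
     | none => (x, y))
    = ((l.take (a + 1)).count 'L', (l.take (a + 1)).count 'R') := by
  cases hsa : l[a]? with
  | none => rw [List.take_succ, hsa]; simp [hx, hy]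
  | some d =>
    rw [List.take_succ, hsa]
    by_cases hd : d = 'L'
    · subst hd; simp [hx, hy, List.count_append]
    · by_cases hd2 : d = 'R'
      · subst hd2; simp [hx, hy, List.count_append]
      · simp only [if_neg hd, if_neg hd2]
        have h1 : ¬ ('L' = d) := fun h => hd h.symm
        have h2 : ¬ ('R' = d) := fun h => hd2 h.symm
        simp [hx, hy, List.count_append, List.count_singleton]
        exact ⟨hd, hd2⟩

lemma altLoop_inv (s t : List Char) : ∀ (b a : Nat),
    canChangeAltLoop s t (List.range' a b)
      ((s.take a).count 'L') ((t.take a).count 'L') ((s.take a).count 'R') ((t.take a).count 'R')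
    = decide (∀ k < a + b, a ≤ k → pcond s t k) := by
  intro b
  induction b with
  | zero =>
    intro a
    have htriv : (∀ k < a, a ≤ k → pcond s t k) := by intro k h1 h2; omega
    simp [List.range'_zero, canChangeAltLoop]
    exact htriv
  | succ b ih =>
    intro a
    rw [List.range'_succ]
    simp only [canChangeAltLoop]
    rw [altStep_pair s a _ _ rfl rfl, altStep_pair t a _ _ rfl rfl]
    by_cases hc : pcond s t a
    · rw [if_neg (by unfold pcond at hc; simp; omega)]
      rw [ih (a + 1)]
      apply (decide_eq_decide).mpr
      constructor
      · intro hall k hk hak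
        rcases Nat.eq_or_lt_of_le hak with heq | hlt
        · exact heq ▸ hc
        · exact hall k (by omega) (by omega)
      · intro hall k hk hak
        exact hall k (by omega) (by omega)
    · rw [if_pos (by unfold pcond at hc; simp; omega)]
      have : ¬ (∀ k < a + (b + 1), a ≤ k → pcond s t k) := by
        intro hall; exact hc (hall a (by omega) (le_refl a))
      simp [this]

-- ===== glue lemmas =====
lemma occg_lt (c : Char) : ∀ (l : List Char) (off x : Nat), x ∈ occg c l off → x < off + l.length := by
  intro l
  induction l with
  | nil => intro off x h; simp [occg] at h
  | cons a r ih =>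
    intro off x h
    by_cases ha : a = c
    · rw [occg, if_pos ha] at h
      rcases List.mem_cons.mp h with h | h
      · simp [h]
      · have := ih (off + 1) x h; simp; omega
    · rw [occg, if_neg ha] at h
      have := ih (off + 1) x h; simp; omega

lemma occg_countP0 (c : Char) (l : List Char) (m : Nat) :
    (occg c l 0).countP (fun x => decide (x < m)) = (l.take m).count c := by
  have := occg_countP c l 0 m
  simpa using this

lemma occg_countP_full (c : Char) (l : List Char) (m : Nat) (h : l.length ≤ m) :
    (occg c l 0).countP (fun x => decide (x < m)) = (occg c l 0).length := by
  rw [List.countP_eq_length]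
  intro a ha
  have := occg_lt c l 0 a ha
  simp; omega

lemma count_eq_occg_length (c : Char) (l : List Char) : List.count c l = (occg c l 0).length := by
  have h := occg_countP0 c l l.length
  rw [occg_countP_full c l l.length (le_refl _), List.take_length] at h
  exact h.symm

lemma forall_filterMap_pairs (c : Char) (Z : List ((Char × Nat) × (Char × Nat)))
    (R : Nat → Nat → Prop) :
    (∀ q ∈ Z, q.1.1 = c → R q.1.2 q.2.2) ↔
    (∀ r ∈ Z.filterMap (fun q => if q.1.1 = c then some (q.1.2, q.2.2) else none), R r.1 r.2) := by
  constructor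
  · intro h r hr
    rw [List.mem_filterMap] at hr
    obtain ⟨q, hq, hg⟩ := hr
    by_cases hc : q.1.1 = c
    · rw [if_pos hc] at hg
      obtain rfl := Option.some.inj hg
      exact h q hq hc
    · rw [if_neg hc] at hg; cases hg
  · intro h q hq hc
    exact h (q.1.2, q.2.2) (List.mem_filterMap.mpr ⟨q, hq, by rw [if_pos hc]⟩)

lemma mem_zip_swap (A B : List Nat) (q : Nat × Nat) : q ∈ A.zip B ↔ (q.2, q.1) ∈ B.zip A := by
  obtain ⟨qa, qb⟩ := q
  constructor <;> intro h <;>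
  · rw [List.mem_iff_getElem] at h ⊢
    obtain ⟨i, hi, hq⟩ := h
    rw [List.getElem_zip] at hq
    simp only [Prod.mk.injEq] at hq
    refine ⟨i, by simp [List.length_zip] at hi ⊢; omega, ?_⟩
    rw [List.getElem_zip]
    simp [hq.1, hq.2]

-- the heart: the pairwise check over the aligned pieces ↔ the prefix-count condition
lemma zipOk_iff_pcond (s' t' : List Char)
    (hfe : s'.filter (· ≠ '_') = t'.filter (· ≠ '_')) :
    zipOk (fpairs s' 0) (fpairs t' 0) = true ↔
      ∀ k < max s'.length t'.length, 0 ≤ k → pcond s' t' k := by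
  have hfst : (fpairs s' 0).map Prod.fst = (fpairs t' 0).map Prod.fst := by
    rw [map_fst_fpairs, map_fst_fpairs, hfe]
  have hlenL : (occg 'L' s' 0).length = (occg 'L' t' 0).length := by
    rw [occg_length 'L' (by decide) s' 0, occg_length 'L' (by decide) t' 0, hfe]
  have hlenR : (occg 'R' s' 0).length = (occg 'R' t' 0).length := by
    rw [occg_length 'R' (by decide) s' 0, occg_length 'R' (by decide) t' 0, hfe]
  rw [zipOk_iff _ _ hfst]
  rw [forall_filterMap_pairs 'L' _ (fun a b => b ≤ a),
      forall_filterMap_pairs 'R' _ (fun a b => a ≤ b)]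
  rw [zip_filterMap_aligned 'L' _ _ hfst, zip_filterMap_aligned 'R' _ _ hfst]
  rw [fpairs_filterMap_occ 'L' (by decide) s' 0, fpairs_filterMap_occ 'L' (by decide) t' 0,
      fpairs_filterMap_occ 'R' (by decide) s' 0, fpairs_filterMap_occ 'R' (by decide) t' 0]
  have hRswap : (∀ r ∈ (occg 'R' s' 0).zip (occg 'R' t' 0), r.1 ≤ r.2) ↔
      (∀ r ∈ (occg 'R' t' 0).zip (occg 'R' s' 0), r.2 ≤ r.1) := by
    constructor
    · intro h r hr
      have := h (r.2, r.1) ((mem_zip_swap _ _ _).mpr (by simpa using hr))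
      simpa using this
    · intro h r hr
      have := h (r.2, r.1) ((mem_zip_swap _ _ _).mpr (by simpa using hr))
      simpa using this
  rw [hRswap]
  rw [point_iff_count _ _ (occg_sorted 'L' s' 0) (occg_sorted 'L' t' 0) hlenL]
  rw [point_iff_count _ _ (occg_sorted 'R' t' 0) (occg_sorted 'R' s' 0) hlenR.symm]
  constructor
  · rintro ⟨hLc, hRc⟩ k _ _
    have h1 := hLc (k + 1)
    have h2 := hRc (k + 1)
    rw [occg_countP0, occg_countP0] at h1 h2
    exact ⟨h1, h2⟩
  · intro hall
    constructor <;> intro m <;> rw [occg_countP0, occg_countP0]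
    · -- L: (s'.take m).count 'L' ≤ (t'.take m).count 'L'
      rcases Nat.eq_zero_or_pos m with h0 | h0
      · subst h0; simp
      · rcases Nat.le_total m (max s'.length t'.length) with hm | hm
        · have := (hall (m - 1) (by omega) (by omega)).1
          have hmm : m - 1 + 1 = m := by omega
          rw [hmm] at this
          exact this
        · rw [List.take_of_length_le (by omega), List.take_of_length_le (by omega)]
          rw [count_eq_occg_length, count_eq_occg_length]
          exact le_of_eq hlenL
    · rcases Nat.eq_zero_or_pos m with h0 | h0
      · subst h0; simp
      · rcases Nat.le_total m (max s'.length t'.length) with hm | hm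
        · have := (hall (m - 1) (by omega) (by omega)).2
          have hmm : m - 1 + 1 = m := by omega
          rw [hmm] at this
          exact this
        · rw [List.take_of_length_le (by omega), List.take_of_length_le (by omega)]
          rw [count_eq_occg_length, count_eq_occg_length]
          exact le_of_eq hlenR.symm

-- ===== the main bridge =====
theorem canChange_eq_alt (s t : String) : canChange s t = canChange_alt s t := by
  rw [canChange, canChange_alt]
  by_cases hfe : s.toList.filter (· ≠ '_') = t.toList.filter (· ≠ '_')
  · have hrep : PySem.Str.replace s "_" "" = PySem.Str.replace t "_" "" :=
      String.toList_inj.mp (by rw [replace_underscore, replace_underscore, hfe])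
    rw [if_neg (not_ne_iff.mpr hrep), if_neg (not_ne_iff.mpr hfe)]
    have hfst : (fpairs s.toList 0).map Prod.fst = (fpairs t.toList 0).map Prod.fst := by
      rw [map_fst_fpairs, map_fst_fpairs, hfe]
    rw [loop_eq_zipOk t.toList s.toList 0 0 _ (by simp) hfst]
    rw [List.range_eq_range']
    have hinv := altLoop_inv s.toList t.toList (max s.toList.length t.toList.length) 0
    simp only [List.take_zero, List.count_nil, Nat.zero_add] at hinv
    rw [hinv]
    have hiff := zipOk_iff_pcond s.toList t.toList hfe
    by_cases hz : zipOk (fpairs s.toList 0) (fpairs t.toList 0) = true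
    · rw [hz]
      exact (decide_eq_true (hiff.mp hz)).symm
    · rw [Bool.not_eq_true] at hz
      rw [hz]
      have hns : ¬ (∀ k < max s.toList.length t.toList.length, 0 ≤ k → pcond s.toList t.toList k) := by
        intro h
        rw [hiff.mpr h] at hz
        cases hz
      exact (decide_eq_false hns).symm
  · have hrep : PySem.Str.replace s "_" "" ≠ PySem.Str.replace t "_" "" := by
      intro he
      exact hfe (by rw [← replace_underscore s, ← replace_underscore t, he])
    rw [if_pos hrep, if_pos hfe]


-- ===== VERDICT (by name: the statement is the Claim_ definition above) =====
theorem canChange_spec : Claim_equal_canChange := by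
  intro s t _
  unfold Spec_canChange
  exact canChange_eq_alt s t
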